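-- pv_equiv track=rewrite | github.com/pypi-data/pypi-mirror-40 | packages/minibuild/minibuild-1.0.9.tar.gz/minibuild-1.0.9/minibuild/arch_parse.py | parse_arch_specific_tokens
-- ===== SOURCE A (Python) =====
-- def parse_arch_specific_tokens(value, arch_supported, allow_empty_tokens, supported_tokens=None, arch_substitutions=None):
--     arch_result = []
--     arch_tokens = {}
--     bits = value.split(',')
--     for bit in bits:
--         arch_token = ''
--         arch_parsed = None
--         if ':' in bit:
--             arch_value, arch_token = bit.split(':', 1)
--             arch_token = arch_token.strip()
--             arch_parsed = arch_value
--         else: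
--             arch_parsed = bit
--         if arch_substitutions and arch_parsed in arch_substitutions:
--             arch_parsed = arch_substitutions[arch_parsed]
--         if arch_parsed not in arch_supported:
--             return None, None
--         if not arch_token and not allow_empty_tokens:
--             return None, None
--         if arch_token and supported_tokens:
--             if arch_token not in supported_tokens:
--                 return None, None
--         if arch_parsed not in arch_result:
--             arch_result.append(arch_parsed)
--         arch_tokens[arch_parsed] = arch_token
--     return arch_result, arch_tokens
-- ===== SOURCE B (Python) =====
-- def parse_arch_specific_tokens(value, arch_supported, allow_empty_tokens, supported_tokens=None, arch_substitutions=None):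
--     # pass 1: parse every comma-separated bit into (arch, token), applying substitutions
--     pairs = []
--     for bit in value.split(','):
--         if ':' in bit:
--             arch, token = bit.split(':', 1)
--             token = token.strip()
--         else:
--             arch, token = bit, ''
--         if arch_substitutions and arch in arch_substitutions:
--             arch = arch_substitutions[arch]
--         pairs.append((arch, token))
--     # pass 2: validate; reject on the first failing pair
--     for arch, token in pairs:
--         if arch not in arch_supported:
--             return None, None
--         if not token and not allow_empty_tokens:
--             return None, None
--         if token and supported_tokens and token not in supported_tokens:
--             return None, None
--     # pass 3: assemble first-seen-order arch list and last-wins token dict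
--     arch_result = []
--     arch_tokens = {}
--     for arch, token in pairs:
--         if arch not in arch_result:
--             arch_result.append(arch)
--         arch_tokens[arch] = token
--     return arch_result, arch_tokens
-- ===== Notes on version B (the rewrite author's own statement) =====
-- stated objective: alternative
-- what changed: A's single loop that parses, substitutes, validates and accumulates each bit with early return is re-decomposed into three separate passes: parse all bits into (arch, token) pairs, then validate every pair, then assemble the deduped arch list and last-wins token dict.
import Mathlib
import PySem

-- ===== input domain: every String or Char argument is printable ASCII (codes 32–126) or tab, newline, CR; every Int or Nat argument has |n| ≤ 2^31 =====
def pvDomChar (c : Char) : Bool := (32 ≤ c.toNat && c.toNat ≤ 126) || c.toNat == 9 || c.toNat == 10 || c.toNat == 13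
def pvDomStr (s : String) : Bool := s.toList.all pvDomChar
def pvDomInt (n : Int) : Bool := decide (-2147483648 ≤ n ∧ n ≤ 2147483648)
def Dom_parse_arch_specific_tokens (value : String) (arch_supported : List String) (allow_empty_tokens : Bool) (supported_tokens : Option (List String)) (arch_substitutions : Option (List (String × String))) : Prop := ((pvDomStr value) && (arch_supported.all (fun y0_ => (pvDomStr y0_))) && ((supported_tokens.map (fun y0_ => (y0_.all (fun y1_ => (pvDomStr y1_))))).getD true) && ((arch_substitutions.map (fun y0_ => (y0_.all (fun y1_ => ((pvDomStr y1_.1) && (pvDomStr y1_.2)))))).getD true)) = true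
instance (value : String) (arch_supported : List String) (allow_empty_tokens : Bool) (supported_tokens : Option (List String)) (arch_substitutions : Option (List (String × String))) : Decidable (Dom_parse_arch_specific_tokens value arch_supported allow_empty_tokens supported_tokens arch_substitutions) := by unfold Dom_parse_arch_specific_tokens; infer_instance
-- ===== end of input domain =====

-- B re-decomposes A's single validating loop into three shaped passes (parse, validate, assemble); same values, objective: alternative decomposition.

-- ===== PORT A =====
-- A's single loop: parse, substitute, validate and accumulate per bit, with early return (= none).
def pvA_loop (arch_supported : List String) (allow_empty_tokens : Bool)
    (supported_tokens : Option (List String)) (arch_substitutions : Option (List (String × String))) :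
    List String → List String → PySem.Dict String String → Option (List String × PySem.Dict String String)
  | [], arch_result, arch_tokens => some (arch_result, arch_tokens)
  | bit :: rest, arch_result, arch_tokens =>
    -- if ':' in bit: arch_value, arch_token = bit.split(':', 1); arch_token = arch_token.strip()
    let pt : String × String :=
      if PySem.Str.isIn ":" bit then
        match PySem.Str.splitMax? bit ":" 1 with
        | some (a :: t :: _) => (a, PySem.Str.strip t)
        | _ => (bit, "")          -- unreachable: split(':',1) with ':' present gives two pieces
      else (bit, "")
    let arch_token := pt.2
    -- if arch_substitutions and arch_parsed in arch_substitutions: arch_parsed = arch_substitutions[arch_parsed]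
    let arch_parsed :=
      match arch_substitutions with
      | none => pt.1
      | some subs =>
        if subs.isEmpty then pt.1
        else match subs.find? (fun q => q.1 == pt.1) with
          | some q => q.2
          | none => pt.1
    if !(arch_supported.contains arch_parsed) then none
    else if arch_token == "" && !allow_empty_tokens then none
    else if !(arch_token == "") &&
            (match supported_tokens with
             | none => false
             | some l => !l.isEmpty && !(l.contains arch_token)) then none
    else pvA_loop arch_supported allow_empty_tokens supported_tokens arch_substitutions rest
      (if arch_result.contains arch_parsed then arch_result else arch_result ++ [arch_parsed])
      (arch_tokens.insert arch_parsed arch_token)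

def parse_arch_specific_tokens (value : String) (arch_supported : List String) (allow_empty_tokens : Bool) (supported_tokens : Option (List String)) (arch_substitutions : Option (List (String × String))) : Option (List String) × (Option (List (String × String))) :=
  let bits := (PySem.Str.split? value ",").getD []   -- sep "," ≠ "": split? is always some
  match pvA_loop arch_supported allow_empty_tokens supported_tokens arch_substitutions bits [] PySem.Dict.empty with
  | none => (none, none)
  | some (arch_result, arch_tokens) => (some arch_result, some arch_tokens.items)

-- ===== PORT B =====
-- pass 1: parse one bit into (arch, token), applying substitutions
def pvB_parse (arch_substitutions : Option (List (String × String))) (bit : String) : String × String :=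
  let pt : String × String :=
    if PySem.Str.isIn ":" bit then
      match PySem.Str.splitMax? bit ":" 1 with
      | some (a :: t :: _) => (a, PySem.Str.strip t)
      | _ => (bit, "")
    else (bit, "")
  match arch_substitutions with
  | none => pt
  | some subs =>
    if subs.isEmpty then pt
    else match subs.find? (fun q => q.1 == pt.1) with
      | some q => (q.2, pt.2)
      | none => pt

-- pass 2: one pair's validity
def pvB_valid (arch_supported : List String) (allow_empty_tokens : Bool)
    (supported_tokens : Option (List String)) (p : String × String) : Bool :=
  arch_supported.contains p.1 &&
  (!(p.2 == "") || allow_empty_tokens) &&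
  (match supported_tokens with
   | none => true
   | some l => (p.2 == "") || l.isEmpty || l.contains p.2)

-- pass 3: first-seen-order arch list and last-wins token dict
def pvB_assemble (pairs : List (String × String)) : List String × PySem.Dict String String :=
  pairs.foldl
    (fun st p => (if st.1.contains p.1 then st.1 else st.1 ++ [p.1], st.2.insert p.1 p.2))
    ([], PySem.Dict.empty)

def parse_arch_specific_tokens_alt (value : String) (arch_supported : List String) (allow_empty_tokens : Bool) (supported_tokens : Option (List String)) (arch_substitutions : Option (List (String × String))) : Option (List String) × (Option (List (String × String))) :=
  let pairs := ((PySem.Str.split? value ",").getD []).map (pvB_parse arch_substitutions)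
  if pairs.all (pvB_valid arch_supported allow_empty_tokens supported_tokens) then
    let st := pvB_assemble pairs
    (some st.1, some st.2.items)
  else (none, none)

-- ===== PRECONDITION & SPEC =====
def Spec_parse_arch_specific_tokens (value : String) (arch_supported : List String) (allow_empty_tokens : Bool) (supported_tokens : Option (List String)) (arch_substitutions : Option (List (String × String))) (out : Option (List String) × (Option (List (String × String)))) : Prop := out = parse_arch_specific_tokens_alt value arch_supported allow_empty_tokens supported_tokens arch_substitutions
instance (value : String) (arch_supported : List String) (allow_empty_tokens : Bool) (supported_tokens : Option (List String)) (arch_substitutions : Option (List (String × String))) (out : Option (List String) × (Option (List (String × String)))) : Decidable (Spec_parse_arch_specific_tokens value arch_supported allow_empty_tokens supported_tokens arch_substitutions out) := by unfold Spec_parse_arch_specific_tokens; infer_instance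

-- ===== CLAIM (what is proved, stated in full; the proofs are below) =====
def Claim_equal_parse_arch_specific_tokens : Prop := ∀ (value : String) (arch_supported : List String) (allow_empty_tokens : Bool) (supported_tokens : Option (List String)) (arch_substitutions : Option (List (String × String))), Dom_parse_arch_specific_tokens value arch_supported allow_empty_tokens supported_tokens arch_substitutions → Spec_parse_arch_specific_tokens value arch_supported allow_empty_tokens supported_tokens arch_substitutions (parse_arch_specific_tokens value arch_supported allow_empty_tokens supported_tokens arch_substitutions)

-- ===== LEMMAS AND PROOFS =====

-- A's interleaved loop = B's validate-then-fold, for any starting accumulator.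
set_option maxHeartbeats 2000000 in
theorem pvA_loop_eq (sup : List String) (ae : Bool) (st : Option (List String))
    (subs : Option (List (String × String))) :
    ∀ (bits : List String) (res : List String) (toks : PySem.Dict String String),
      pvA_loop sup ae st subs bits res toks =
        (if (bits.map (pvB_parse subs)).all (pvB_valid sup ae st) then
          some ((bits.map (pvB_parse subs)).foldl
            (fun s p => (if s.1.contains p.1 then s.1 else s.1 ++ [p.1], s.2.insert p.1 p.2))
            (res, toks))
        else none) := by
  intro bits
  induction bits with
  | nil => intro res toks; simp [pvA_loop]
  | cons bit rest ih =>
    intro res toks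
    simp only [pvA_loop, pvB_parse, List.map_cons, List.all_cons]
    generalize (if PySem.Str.isIn ":" bit then
        match PySem.Str.splitMax? bit ":" 1 with
        | some (a :: t :: _) => (a, PySem.Str.strip t)
        | _ => (bit, "")
      else (bit, "")) = pt
    obtain ⟨a, t⟩ := pt
    rcases subs with _ | s
    · simp only [ih, pvB_valid]
      by_cases h1 : sup.contains a <;>
        by_cases h2 : t == "" <;>
          cases ae <;>
            rcases st with _ | l <;>
              simp_all <;>
                first
                  | rfl
                  | (by_cases h3 : l.isEmpty <;> by_cases h4 : l.contains t <;> simp_all)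
    · by_cases he : s.isEmpty
      · simp only [he, if_pos, ih, pvB_valid]
        by_cases h1 : sup.contains a <;>
          by_cases h2 : t == "" <;>
            cases ae <;>
              rcases st with _ | l <;>
                simp_all <;>
                  first
                    | rfl
                    | (by_cases h3 : l.isEmpty <;> by_cases h4 : l.contains t <;> simp_all)
      · simp only [he, if_false, Bool.false_eq_true, ih, pvB_valid]
        rcases hf : s.find? (fun q => q.1 == a) with _ | q <;> simp only [hf]
        · by_cases h1 : sup.contains a <;>
            by_cases h2 : t == "" <;>
              cases ae <;>
                rcases st with _ | l <;>
                  simp_all <;>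
                    first
                      | rfl
                      | (by_cases h3 : l.isEmpty <;> by_cases h4 : l.contains t <;> simp_all)
        · by_cases h1 : sup.contains q.2 <;>
            by_cases h2 : t == "" <;>
              cases ae <;>
                rcases st with _ | l <;>
                  simp_all <;>
                    first
                      | rfl
                      | (by_cases h3 : l.isEmpty <;> by_cases h4 : l.contains t <;> simp_all)

theorem parse_arch_specific_tokens_spec : Claim_equal_parse_arch_specific_tokens := by
  intro value sup ae st subs _hdom
  unfold Spec_parse_arch_specific_tokens parse_arch_specific_tokens parse_arch_specific_tokens_alt pvB_assemble
  simp only [pvA_loop_eq]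
  by_cases h : (((PySem.Str.split? value ",").getD []).map (pvB_parse subs)).all (pvB_valid sup ae st) <;>
    simp [h]
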